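-- pv_equiv track=rewrite | github.com/ASonay/MVA_keras_NN | mvasup.py | CorrectNames
-- ===== SOURCE A (Python) =====
-- def CorrectNames(variable_names):
--     for i in range(len(variable_names)):
--         variable_names[i]=variable_names[i].replace('(','')
--         variable_names[i]=variable_names[i].replace(')','')
--         variable_names[i]=variable_names[i].replace('&','')
--         variable_names[i]=variable_names[i].replace('$','')
--         variable_names[i]=variable_names[i].replace('[','')
--         variable_names[i]=variable_names[i].replace(']','')
--         variable_names[i]=variable_names[i].replace('-','')
--         variable_names[i]=variable_names[i].replace('<','')
--         variable_names[i]=variable_names[i].replace('>','')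
--         variable_names[i]=variable_names[i].replace('*','')
--
--     return variable_names
-- ===== SOURCE B (Python) =====
-- def CorrectNames(variable_names):
--     bad = set('()&$[]-<>*')
--     for i in range(len(variable_names)):
--         kept = []
--         for c in variable_names[i]:
--             if c not in bad:
--                 kept.append(c)
--         variable_names[i] = ''.join(kept)
--     return variable_names
-- ===== Notes on version B (the rewrite author's own statement) =====
-- stated objective: simpler
-- what changed: Replaces ten successive full-string .replace scans per name by one single-pass filter over the characters against a set of the ten special characters.
import Mathlib
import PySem

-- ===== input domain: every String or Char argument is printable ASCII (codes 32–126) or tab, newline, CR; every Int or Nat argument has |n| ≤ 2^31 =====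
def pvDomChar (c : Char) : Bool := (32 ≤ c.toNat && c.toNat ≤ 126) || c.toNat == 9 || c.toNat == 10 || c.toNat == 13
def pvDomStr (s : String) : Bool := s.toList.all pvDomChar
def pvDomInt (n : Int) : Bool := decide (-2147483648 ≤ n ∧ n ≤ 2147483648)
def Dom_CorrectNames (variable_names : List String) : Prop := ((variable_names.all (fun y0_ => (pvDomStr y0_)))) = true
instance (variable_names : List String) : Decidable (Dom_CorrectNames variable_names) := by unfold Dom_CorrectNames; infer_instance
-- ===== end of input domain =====

-- B replaces ten successive full-string .replace scans per name by one single-pass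
-- character filter against a set of the ten special characters (objective: simpler).
-- A (and B) mutate the argument list in place in Python; the equivalence proved here
-- is about the RETURN value (B performs the same in-place mutation).

-- ===== PORT A =====
-- per-element body of A's index loop: ten successive replaces
def pvFixA (s : String) : String :=
  let s := PySem.Str.replace s "(" ""
  let s := PySem.Str.replace s ")" ""
  let s := PySem.Str.replace s "&" ""
  let s := PySem.Str.replace s "$" ""
  let s := PySem.Str.replace s "[" ""
  let s := PySem.Str.replace s "]" ""
  let s := PySem.Str.replace s "-" ""
  let s := PySem.Str.replace s "<" ""
  let s := PySem.Str.replace s ">" ""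
  let s := PySem.Str.replace s "*" ""
  s

def CorrectNames (variable_names : List String) : List String :=
  variable_names.map pvFixA

-- ===== PORT B =====
def pvBad : List Char := ['(', ')', '&', '$', '[', ']', '-', '<', '>', '*']

-- single-pass filter over the characters, as in Source B's inner loop
def pvKeep : List Char → List Char
  | [] => []
  | c :: t => if pvBad.contains c then pvKeep t else c :: pvKeep t

def CorrectNames_alt (variable_names : List String) : List String :=
  variable_names.map (fun s => String.ofList (pvKeep s.toList))

-- ===== PRECONDITION & SPEC =====
def Spec_CorrectNames (variable_names : List String) (out : List String) : Prop := out = CorrectNames_alt variable_names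
instance (variable_names : List String) (out : List String) : Decidable (Spec_CorrectNames variable_names out) := by unfold Spec_CorrectNames; infer_instance

-- ===== CLAIM (what is proved, stated in full; the proofs are below) =====
def Claim_equal_CorrectNames : Prop := ∀ (variable_names : List String), Dom_CorrectNames variable_names → Spec_CorrectNames variable_names (CorrectNames variable_names)

-- ===== LEMMAS AND PROOFS =====

theorem replace_go_single (b : Char) :
    ∀ (l : List Char) (fuel : Nat) (acc : List Char), l.length ≤ fuel →
      PySem.Chars.replace.go [b] [] fuel l acc = acc.reverse ++ l.filter (fun c => !(c == b)) := by
  intro l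
  induction l with
  | nil =>
    intro fuel acc _
    cases fuel <;> simp [PySem.Chars.replace.go]
  | cons c t ih =>
    intro fuel acc h
    cases fuel with
    | zero => simp at h
    | succ n =>
      simp only [PySem.Chars.replace.go]
      have ht : t.length ≤ n := by simp at h; omega
      by_cases hc : c = b
      · subst hc
        have hpre : [c].isPrefixOf (c :: t) = true := by simp [List.isPrefixOf]
        simp only [hpre, if_pos]
        rw [show List.drop [c].length (c :: t) = t by simp]
        simp only [List.reverse_nil, List.nil_append]
        rw [ih n acc ht]
        simp
      · have hpre : [b].isPrefixOf (c :: t) = false := by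
          simp [List.isPrefixOf]
          exact fun hh => absurd hh.symm hc
        simp only [hpre]
        rw [if_neg (by simp)]
        rw [ih n (c :: acc) ht]
        have hcb : (c == b) = false := by simp [hc]
        simp [List.filter, hcb]

theorem replace_single_char (s : String) (b : Char) :
    (PySem.Str.replace s (String.ofList [b]) "").toList = s.toList.filter (fun c => !(c == b)) := by
  rw [PySem.Str.toList_replace]
  rw [String.toList_ofList]
  show PySem.Chars.replace s.toList [b] "".toList = _
  have he : ("" : String).toList = [] := rfl
  rw [he]
  unfold PySem.Chars.replace
  rw [if_neg (by simp)]
  rw [replace_go_single b s.toList s.toList.length [] (Nat.le_refl _)]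
  simp

theorem pvKeep_filter (l : List Char) : pvKeep l = l.filter (fun c => !(pvBad.contains c)) := by
  induction l with
  | nil => rfl
  | cons c t ih =>
    by_cases h : c ∈ pvBad
    · simp [pvKeep, List.filter, ih, List.contains_eq_mem, h]
    · simp [pvKeep, List.filter, ih, List.contains_eq_mem, h]

theorem fixA_eq (s : String) : pvFixA s = String.ofList (pvKeep s.toList) := by
  have h : (pvFixA s).toList = pvKeep s.toList := by
    unfold pvFixA
    rw [replace_single_char]
    rw [replace_single_char, replace_single_char, replace_single_char, replace_single_char,
        replace_single_char, replace_single_char, replace_single_char, replace_single_char,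
        replace_single_char]
    rw [pvKeep_filter]
    simp only [List.filter_filter]
    apply List.filter_congr
    intro c _
    simp only [pvBad, List.contains_eq_mem]
    rw [Bool.eq_iff_iff]
    simp
    tauto
  rw [← h, String.ofList_toList]

-- ===== VERDICT (by name: the statement is the Claim_ definition above) =====
theorem CorrectNames_spec : Claim_equal_CorrectNames := by
  intro vn _
  show CorrectNames vn = CorrectNames_alt vn
  unfold CorrectNames CorrectNames_alt
  exact List.map_congr_left (fun s _ => fixA_eq s)
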